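-- pv_equiv track=rewrite | github.com/biocore/qiime | qiime/parallel/pick_otus.py | greedy_partition
-- ===== SOURCE A (Python) =====
-- def greedy_partition(counts, n):
--     """Distribute k counts evenly across n buckets,
--
--     counts: dict of key, counts pairs
--     n: number of buckets that the counts should be distributed over
--     """
--
--     buckets = [[] for i in range(n)]
--     fill_levels = [0 for i in range(n)]
--
--     for key in sorted(counts, reverse=True,
--                       key=lambda c: counts[c]):
--         smallest = fill_levels.index(min(fill_levels))
--         buckets[smallest].append(key)
--         fill_levels[smallest] += counts[key]
--
--     return buckets, fill_levels
-- ===== SOURCE B (Python) =====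
-- def greedy_partition(counts, n):
--     """Distribute k counts evenly across n buckets,
--
--     counts: dict of key, counts pairs
--     n: number of buckets that the counts should be distributed over
--     """
--     buckets = [[] for _ in range(n)]
--     fill_levels = [0 for _ in range(n)]
--     # Priority queue of (fill_level, bucket_index) pairs kept sorted in
--     # DESCENDING lexicographic order, so the least-filled bucket (lowest
--     # index on ties) is always at the end and is popped in O(1); the
--     # updated pair is re-inserted by binary search instead of re-scanning
--     # the fill levels for the minimum on every assignment.
--     pq = [(0, i) for i in reversed(range(n))]
--     for key in sorted(counts, reverse=True, key=lambda c: counts[c]):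
--         fill, i = pq.pop()
--         buckets[i].append(key)
--         fill += counts[key]
--         fill_levels[i] = fill
--         item = (fill, i)
--         lo, hi = 0, len(pq)
--         while lo < hi:
--             mid = (lo + hi) // 2
--             if pq[mid] > item:
--                 lo = mid + 1
--             else:
--                 hi = mid
--         pq.insert(lo, item)
--     return buckets, fill_levels
-- ===== Notes on version B (the rewrite author's own statement) =====
-- stated objective: faster
-- what changed: Replaces A's per-key linear scan (min + .index over fill_levels) with a descending-sorted priority list of (fill, index) pairs: the least-filled bucket is popped from the end in O(1) and the updated pair is re-inserted at a position found by binary search.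
-- outside the precondition, e.g. on greedy_partition({'a': 1}, 0): A raises ValueError, B raises IndexError
import Mathlib
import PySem

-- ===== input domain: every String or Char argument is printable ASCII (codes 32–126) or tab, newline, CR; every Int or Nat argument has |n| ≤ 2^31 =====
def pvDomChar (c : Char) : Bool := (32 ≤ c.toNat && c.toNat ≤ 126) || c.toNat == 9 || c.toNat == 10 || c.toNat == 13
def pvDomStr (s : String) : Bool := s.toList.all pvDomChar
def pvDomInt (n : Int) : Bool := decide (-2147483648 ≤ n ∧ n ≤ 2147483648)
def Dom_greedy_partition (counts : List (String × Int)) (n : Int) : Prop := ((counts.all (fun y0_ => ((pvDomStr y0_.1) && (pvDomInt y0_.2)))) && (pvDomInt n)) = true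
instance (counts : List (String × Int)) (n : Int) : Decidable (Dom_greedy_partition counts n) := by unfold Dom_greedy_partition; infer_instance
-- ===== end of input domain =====

-- B replaces A's per-key linear scan for the least-filled bucket (min + index over
-- fill_levels) by a descending-sorted priority list of (fill, index) pairs: pop the
-- minimum from the end in O(1) and re-insert the updated pair by binary search.

-- ===== PORT A =====
-- one iteration of A's for-loop; state = (buckets, fill_levels)
def gpA_step (d : PySem.Dict String Int) (st : List (List String) × List Int) (key : String) :
    List (List String) × List Int :=
  -- smallest = fill_levels.index(min(fill_levels)); min/.index raise on [] — excluded by Pre_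
  let smallest := (PySem.List.index? st.2 ((PySem.List.min? st.2 (fun x => x)).getD 0)).getD 0
  -- buckets[smallest].append(key); fill_levels[smallest] += counts[key]
  -- (smallest is a non-negative in-range index produced by .index, so plain Nat indexing is exact)
  (st.1.set smallest ((st.1[smallest]?.getD []) ++ [key]),
   st.2.set smallest ((st.2[smallest]?.getD 0) + d.getD key 0))

def greedy_partition (counts : List (String × Int)) (n : Int) : List (List String) × List Int :=
  let d := PySem.Dict.ofList counts
  let buckets : List (List String) := (PySem.List.pyRange 0 n 1).map (fun _ => ([] : List String))
  let fill_levels : List Int := (PySem.List.pyRange 0 n 1).map (fun _ => (0 : Int))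
  (PySem.List.sorted (PySem.Dict.keys d) (fun c => d.getD c 0) true).foldl (gpA_step d)
    (buckets, fill_levels)

-- ===== PORT B =====
-- the hand-written binary search of Source B: first position lo with not (pq[lo] > item),
-- comparing (fill, index) pairs lexicographically as Python's tuple > does
def gpB_bisect (pq : List (Int × Int)) (item : Int × Int) (lo hi : Nat) : Nat :=
  if lo < hi then
    let mid := (lo + hi) / 2
    let p := pq[mid]?.getD (0, 0)   -- pq[mid]; mid is always in range when called as in gpB_step
    if item.1 < p.1 ∨ (p.1 = item.1 ∧ item.2 < p.2) then gpB_bisect pq item (mid + 1) hi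
    else gpB_bisect pq item lo mid
  else lo
termination_by hi - lo
decreasing_by all_goals omega

-- one iteration of B's for-loop; state = ((buckets, fill_levels), pq)
def gpB_step (d : PySem.Dict String Int) (st : (List (List String) × List Int) × List (Int × Int))
    (key : String) : (List (List String) × List Int) × List (Int × Int) :=
  -- fill, i = pq.pop()  (raises on empty pq — excluded by Pre_)
  let fi := st.2.getLast?.getD (0, 0)
  let i := fi.2.toNat          -- queue indices are the non-negative bucket numbers
  let pq1 := st.2.dropLast
  let fill := fi.1 + d.getD key 0
  let item := (fill, fi.2)
  let lo := gpB_bisect pq1 item 0 pq1.length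
  ((st.1.1.set i ((st.1.1[i]?.getD []) ++ [key]), st.1.2.set i fill),
   PySem.List.insert pq1 (lo : Int) item)   -- pq.insert(lo, item)

def greedy_partition_alt (counts : List (String × Int)) (n : Int) : List (List String) × List Int :=
  let d := PySem.Dict.ofList counts
  let buckets : List (List String) := (PySem.List.pyRange 0 n 1).map (fun _ => ([] : List String))
  let fill_levels : List Int := (PySem.List.pyRange 0 n 1).map (fun _ => (0 : Int))
  -- pq = [(0, i) for i in reversed(range(n))]
  let pq : List (Int × Int) := ((PySem.List.pyRange 0 n 1).reverse).map (fun i => ((0 : Int), i))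
  ((PySem.List.sorted (PySem.Dict.keys d) (fun c => d.getD c 0) true).foldl (gpB_step d)
    ((buckets, fill_levels), pq)).1

-- ===== PRECONDITION & SPEC =====
-- A raises ValueError (min of an empty list) when there are keys to place but no bucket
-- (counts non-empty and n ≤ 0); exactly those inputs are excluded.
def Pre_greedy_partition (counts : List (String × Int)) (n : Int) : Prop :=
  counts = [] ∨ 0 < n
instance (counts : List (String × Int)) (n : Int) : Decidable (Pre_greedy_partition counts n) := by
  unfold Pre_greedy_partition; infer_instance

def pvWitness_greedy_partition : (List (String × Int)) × Int := ([("a", 2), ("b", 1), ("c", 3)], 2)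

def Spec_greedy_partition (counts : List (String × Int)) (n : Int)
    (out : List (List String) × List Int) : Prop := out = greedy_partition_alt counts n
instance (counts : List (String × Int)) (n : Int) (out : List (List String) × List Int) :
    Decidable (Spec_greedy_partition counts n out) := by unfold Spec_greedy_partition; infer_instance

-- ===== CLAIM (what is proved, stated in full; the proofs are below) =====
def Claim_equal_greedy_partition : Prop := ∀ (counts : List (String × Int)) (n : Int),
  Dom_greedy_partition counts n → Pre_greedy_partition counts n →
  Spec_greedy_partition counts n (greedy_partition counts n)

-- ===== LEMMAS AND PROOFS =====

-- Python's lexicographic < on (Int, Int) pairs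
def plex (a b : Int × Int) : Prop := a.1 < b.1 ∨ (a.1 = b.1 ∧ a.2 < b.2)

theorem plex_trans {a b c : Int × Int} (h1 : plex a b) (h2 : plex b c) : plex a c := by
  unfold plex at *; omega

theorem plex_of_not_of_ne {a b : Int × Int} (h1 : ¬ plex a b) (h2 : b.2 ≠ a.2) : plex b a := by
  unfold plex at *; omega

-- pq is strictly descending (the new-minimum-at-the-end priority order of Source B)
def pdesc (pq : List (Int × Int)) : Prop := pq.Pairwise (fun a b => plex b a)

-- the multiset pq represents: all (fill, index) pairs of the current fill_levels
def pairs (fills : List Int) : List (Int × Int) :=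
  (List.range fills.length).map (fun j => (fills.getD j 0, (j : Int)))

theorem length_pairs (fills : List Int) : (pairs fills).length = fills.length := by
  simp [pairs]

theorem getElem_pairs (fills : List Int) (j : Nat) (h : j < (pairs fills).length) :
    (pairs fills)[j] = (fills[j]'(by simpa [length_pairs] using h), (j : Int)) := by
  simp [pairs, List.getD_eq_getElem?_getD, List.getElem?_eq_getElem (by simpa [length_pairs] using h)]

theorem mem_pairs {fills : List Int} {x : Int × Int} (h : x ∈ pairs fills) :
    ∃ (j : Nat) (hj : j < fills.length), x = (fills[j], (j : Int)) := by
  obtain ⟨j, hj, rfl⟩ := List.getElem_of_mem h |>.imp (fun j h => h)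
  exact ⟨j, by simpa [length_pairs] using hj, by rw [getElem_pairs]⟩

theorem nodup_snd_pairs (fills : List Int) : ((pairs fills).map (·.2)).Nodup := by
  have h : (pairs fills).map (·.2) = List.map (fun j : Nat => (j : Int)) (List.range fills.length) := by
    simp only [pairs, List.map_map]; rfl
  rw [h]
  exact List.Nodup.map (fun a b hab => by exact_mod_cast hab) List.nodup_range

theorem pairs_set (fills : List Int) (j : Nat) (v : Int) (hj : j < fills.length) :
    pairs (fills.set j v) = (pairs fills).set j (v, (j : Int)) := by
  apply List.ext_getElem
  · simp [length_pairs]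
  · intro k h1 h2
    rw [getElem_pairs, List.getElem_set]
    split_ifs with hkj
    · subst hkj; simp
    · have hk : k < (pairs fills).length := by
        simpa [length_pairs] using h2
      rw [show ((pairs fills).set j (v, (j:Int)))[k] = (pairs fills)[k]'hk from by
        rw [List.getElem_set]; simp [hkj]]
      rw [getElem_pairs]

-- decompose a list at a position
theorem eq_take_cons_drop {α : Type} (l : List α) (j : Nat) (h : j < l.length) :
    l.take j ++ l[j] :: l.drop (j+1) = l := by
  rw [List.getElem_cons_drop h, List.take_append_drop]

theorem set_eq_take_cons_drop {α : Type} (l : List α) (j : Nat) (v : α) (h : j < l.length) :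
    l.set j v = l.take j ++ v :: l.drop (j+1) := by
  rw [List.set_eq_take_append_cons_drop]; simp [h]

-- PySem.List.insert at an in-range non-negative position is take/cons/drop
theorem insert_take_drop (xs : List (Int × Int)) (k : Nat) (v : Int × Int) (hk : k ≤ xs.length) :
    PySem.List.insert xs (k : Int) v = xs.take k ++ v :: xs.drop k := by
  simp only [PySem.List.insert, PySem.List.sliceIndices]
  split_ifs <;>
    first
      | omega
      | (have h : (min (k : Int) (xs.length : Int)).toNat = k := by omega
         rw [h])

theorem pdesc_getElem {pq : List (Int × Int)} (h : pdesc pq) {i j : Nat} (hij : i < j)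
    (hj : j < pq.length) : plex pq[j] (pq[i]'(lt_trans hij hj)) :=
  List.pairwise_iff_getElem.mp h i j (lt_trans hij hj) hj hij

-- what the hand-written binary search computes: a split point of the descending pq
theorem gpB_bisect_spec (pq : List (Int × Int)) (item : Int × Int) (hdesc : pdesc pq) :
    ∀ (k lo hi : Nat), hi - lo = k → lo ≤ hi → hi ≤ pq.length →
      (∀ (j : Nat) (hj : j < pq.length), j < lo → plex item pq[j]) →
      (∀ (j : Nat) (hj : j < pq.length), hi ≤ j → ¬ plex item pq[j]) →
      lo ≤ gpB_bisect pq item lo hi ∧ gpB_bisect pq item lo hi ≤ hi ∧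
      (∀ (j : Nat) (hj : j < pq.length), j < gpB_bisect pq item lo hi → plex item pq[j]) ∧
      (∀ (j : Nat) (hj : j < pq.length), gpB_bisect pq item lo hi ≤ j → ¬ plex item pq[j]) := by
  intro k
  induction k using Nat.strong_induction_on with
  | _ k ih =>
    intro lo hi hk hle hhi hpre hsuf
    rw [gpB_bisect]
    by_cases hlh : lo < hi
    · simp only [hlh, if_true]
      have hmidlt : (lo + hi) / 2 < hi := by omega
      have hmidge : lo ≤ (lo + hi) / 2 := by omega
      have hmidpq : (lo + hi) / 2 < pq.length := by omega
      simp only [List.getElem?_eq_getElem hmidpq, Option.getD_some]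
      by_cases hc : item.1 < (pq[(lo + hi) / 2]).1 ∨
          ((pq[(lo + hi) / 2]).1 = item.1 ∧ item.2 < (pq[(lo + hi) / 2]).2)
      · have hcp : plex item pq[(lo + hi) / 2] := by unfold plex; omega
        simp only [hc, if_true]
        have hpre' : ∀ (j : Nat) (hj : j < pq.length), j < (lo + hi) / 2 + 1 → plex item pq[j] := by
          intro j hj hjlt
          rcases Nat.lt_succ_iff_lt_or_eq.mp hjlt with h | h
          · exact plex_trans hcp (pdesc_getElem hdesc h hmidpq)
          · subst h; exact hcp
        obtain ⟨h1, h2, h3, h4⟩ := ih (hi - ((lo + hi) / 2 + 1)) (by omega) ((lo + hi) / 2 + 1)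
          hi (by omega) (by omega) hhi hpre' hsuf
        exact ⟨by omega, h2, h3, h4⟩
      · have hcp : ¬ plex item pq[(lo + hi) / 2] := by unfold plex; omega
        simp only [hc, if_false]
        have hsuf' : ∀ (j : Nat) (hj : j < pq.length), (lo + hi) / 2 ≤ j → ¬ plex item pq[j] := by
          intro j hj hjge hpl
          rcases Nat.lt_or_ge ((lo + hi) / 2) j with h | h
          · exact hcp (plex_trans hpl (pdesc_getElem hdesc h hj))
          · have hjm : j = (lo + hi) / 2 := by omega
            subst hjm; exact hcp hpl
        obtain ⟨h1, h2, h3, h4⟩ := ih ((lo + hi) / 2 - lo) (by omega) lo ((lo + hi) / 2) rfl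
          (by omega) (by omega) hpre hsuf'
        exact ⟨h1, by omega, h3, h4⟩
    · simp only [hlh, if_false]
      exact ⟨le_refl _, hle, hpre, fun j hj hij => hsuf j hj (by omega)⟩

-- popping the descending pq yields exactly A's (min(fill_levels), fill_levels.index(min)) pair
theorem pop_eq {pq : List (Int × Int)} {fills : List Int} (hdesc : pdesc pq)
    (hperm : pq.Perm (pairs fills)) (hne : fills ≠ []) :
    ∃ (m : Int) (j : Nat), ∃ (hj : j < fills.length),
      PySem.List.min? fills (fun x => x) = some m ∧
      PySem.List.index? fills m = some j ∧ fills[j] = m ∧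
      pq.getLast?.getD (0, 0) = (m, (j : Int)) := by
  obtain ⟨m, hm⟩ : ∃ m, PySem.List.min? fills (fun x => x) = some m := by
    cases h : PySem.List.min? fills (fun x => x) with
    | none => exact absurd ((PySem.List.min?_eq_none_iff fills _).mp h) hne
    | some m => exact ⟨m, rfl⟩
  have hmem := PySem.List.min?_mem hm
  have hmin := PySem.List.min?_isMin hm
  obtain ⟨j, hidx⟩ : ∃ j, PySem.List.index? fills m = some j := by
    have := (PySem.List.index?_isSome_iff fills m).mpr hmem
    exact Option.isSome_iff_exists.mp this
  obtain ⟨hj, hfj, hfirst⟩ := PySem.List.getElem_of_index?_eq_some hidx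
  have hpqne : pq ≠ [] := by
    intro h
    have := hperm.length_eq
    rw [h, length_pairs] at this
    exact hne (List.length_eq_zero_iff.mp this.symm)
  have hg : pq.getLast? = some (pq.getLast hpqne) := List.getLast?_eq_some_getLast hpqne
  set g := pq.getLast hpqne with hgdef
  have hlen : 0 < pq.length := List.length_pos_iff.mpr hpqne
  have hgelem : g = pq[pq.length - 1]'(by omega) := List.getLast_eq_getElem hpqne
  have hlast : ∀ x ∈ pq, x = g ∨ plex g x := by
    intro x hx
    obtain ⟨i, hi, rfl⟩ := List.getElem_of_mem hx
    rcases Nat.lt_or_ge i (pq.length - 1) with h | h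
    · right; rw [hgelem]; exact pdesc_getElem hdesc h (by omega)
    · left; rw [hgelem]; congr 1; omega
  have hxmem : (m, (j : Int)) ∈ pq := by
    rw [hperm.mem_iff]
    have : (pairs fills)[j]'(by rw [length_pairs]; exact hj) = (m, (j : Int)) := by
      rw [getElem_pairs]; rw [hfj]
    rw [← this]; exact List.getElem_mem _
  have hgmem : g ∈ pairs fills := hperm.subset (List.getLast_mem hpqne)
  obtain ⟨j0, hj0, hgval⟩ := mem_pairs hgmem
  have hgm : g = (m, (j : Int)) := by
    rcases hlast _ hxmem with h | h
    · exact h.symm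
    · exfalso
      have hge : m ≤ fills[j0] := hmin _ (List.getElem_mem _)
      rcases h with h | ⟨h1, h2⟩
      · rw [hgval] at h; simp at h; omega
      · rw [hgval] at h1 h2
        simp at h1 h2
        have hj0j : j0 < j := by exact_mod_cast h2
        exact hfirst j0 hj0j (by omega)
  refine ⟨m, j, hj, hm, hidx, hfj, ?_⟩
  rw [hg]; simpa using hgm

-- one loop iteration: B's state projects to A's state and the queue invariant is preserved
theorem gp_step_eq (d : PySem.Dict String Int) (key : String)
    (buckets : List (List String)) (fills : List Int) (pq : List (Int × Int))
    (hne : fills ≠ []) (hperm : pq.Perm (pairs fills)) (hdesc : pdesc pq) :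
    (gpB_step d ((buckets, fills), pq) key).1 = gpA_step d (buckets, fills) key ∧
    (gpB_step d ((buckets, fills), pq) key).2.Perm (pairs (gpA_step d (buckets, fills) key).2) ∧
    pdesc (gpB_step d ((buckets, fills), pq) key).2 ∧
    (gpA_step d (buckets, fills) key).2 ≠ [] := by
  obtain ⟨m, j, hj, hmin, hidx, hfj, hpop⟩ := pop_eq hdesc hperm hne
  have hpqlen : pq.length = fills.length := by rw [hperm.length_eq, length_pairs]
  have hpqne : pq ≠ [] := by
    intro h; rw [h] at hpqlen; simp at hpqlen
    exact hne (List.length_eq_zero_iff.mp hpqlen.symm)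
  have hglast : pq.getLast hpqne = (m, (j : Int)) := by
    have h := List.getLast?_eq_some_getLast hpqne
    rw [h] at hpop; simpa using hpop
  have hsplit : pq.dropLast ++ [(m, (j : Int))] = pq := by
    rw [← hglast]; exact List.dropLast_append_getLast hpqne
  have hA : gpA_step d (buckets, fills) key =
      (buckets.set j ((buckets[j]?.getD []) ++ [key]), fills.set j (m + d.getD key 0)) := by
    simp only [gpA_step, hmin, Option.getD_some, hidx, List.getElem?_eq_getElem hj, hfj]
  have hB : gpB_step d ((buckets, fills), pq) key =
      ((buckets.set j ((buckets[j]?.getD []) ++ [key]), fills.set j (m + d.getD key 0)),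
       PySem.List.insert pq.dropLast
         ((gpB_bisect pq.dropLast (m + d.getD key 0, (j : Int)) 0 pq.dropLast.length : Nat) : Int)
         (m + d.getD key 0, (j : Int))) := by
    simp only [gpB_step, hpop, Int.toNat_natCast]
  have hdesc1 : pdesc pq.dropLast := List.Pairwise.sublist (List.dropLast_sublist pq) hdesc
  have hlen1 : pq.dropLast.length = fills.length - 1 := by
    rw [List.length_dropLast, hpqlen]
  -- all second components in the remaining queue differ from j
  have hsnodup : (pq.map (·.2)).Nodup :=
    List.Nodup.perm (nodup_snd_pairs fills) (hperm.map (·.2)).symm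
  have hsnd : ∀ x ∈ pq.dropLast, x.2 ≠ (j : Int) := by
    intro x hx hxe
    rw [← hsplit, List.map_append] at hsnodup
    exact List.disjoint_of_nodup_append hsnodup (List.mem_map_of_mem hx) (by simp [hxe])
  -- the binary search splits the descending queue around the new item
  obtain ⟨hr0, hrle, hpre, hsuf⟩ :=
    gpB_bisect_spec pq.dropLast (m + d.getD key 0, (j : Int)) hdesc1 pq.dropLast.length 0
      pq.dropLast.length rfl (Nat.zero_le _) le_rfl
      (by intro j2 hj2 h; omega) (by intro j2 hj2 h; omega)
  have hsuf' : ∀ (k : Nat) (hk : k < pq.dropLast.length),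
      gpB_bisect pq.dropLast (m + d.getD key 0, (j : Int)) 0 pq.dropLast.length ≤ k →
      plex pq.dropLast[k] (m + d.getD key 0, (j : Int)) := by
    intro k hk hrk
    exact plex_of_not_of_ne (hsuf k hk hrk) (hsnd _ (List.getElem_mem _))
  have hins : PySem.List.insert pq.dropLast
      ((gpB_bisect pq.dropLast (m + d.getD key 0, (j : Int)) 0 pq.dropLast.length : Nat) : Int)
      (m + d.getD key 0, (j : Int)) =
      pq.dropLast.take (gpB_bisect pq.dropLast (m + d.getD key 0, (j : Int)) 0 pq.dropLast.length)
        ++ (m + d.getD key 0, (j : Int)) ::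
      pq.dropLast.drop (gpB_bisect pq.dropLast (m + d.getD key 0, (j : Int)) 0 pq.dropLast.length) :=
    insert_take_drop _ _ _ hrle
  set r := gpB_bisect pq.dropLast (m + d.getD key 0, (j : Int)) 0 pq.dropLast.length with hr
  set item : Int × Int := (m + d.getD key 0, (j : Int)) with hitemdef
  -- sortedness of the new queue
  have hpdesc2 : pdesc (pq.dropLast.take r ++ item :: pq.dropLast.drop r) := by
    rw [pdesc, List.pairwise_append]
    refine ⟨List.Pairwise.sublist (List.take_sublist _ _) hdesc1, ?_, ?_⟩
    · rw [List.pairwise_cons]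
      refine ⟨?_, List.Pairwise.sublist (List.drop_sublist _ _) hdesc1⟩
      intro y hy
      obtain ⟨k, hk, rfl⟩ := List.getElem_of_mem hy
      rw [List.getElem_drop]
      exact hsuf' (r + k) (by simp at hk; omega) (by omega)
    · intro a ha b hb
      obtain ⟨ka, hka, rfl⟩ := List.getElem_of_mem ha
      have hkar : ka < r := by simp at hka; omega
      have hkalen : ka < pq.dropLast.length := by simp at hka; omega
      rw [List.getElem_take]
      rcases List.mem_cons.mp hb with rfl | hbd
      · exact hpre ka hkalen hkar
      · obtain ⟨kb, hkb, rfl⟩ := List.getElem_of_mem hbd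
        rw [List.getElem_drop]
        exact plex_trans (hsuf' (r + kb) (by simp at hkb; omega) (by omega))
          (hpre ka hkalen hkar)
  -- the new queue is a permutation of the new fill pairs
  have hjP : j < (pairs fills).length := by rw [length_pairs]; exact hj
  have hPj : (pairs fills)[j]'hjP = (m, (j : Int)) := by rw [getElem_pairs]; rw [hfj]
  have hPdecomp : pairs fills =
      (pairs fills).take j ++ (m, (j : Int)) :: (pairs fills).drop (j+1) := by
    conv_lhs => rw [← eq_take_cons_drop (pairs fills) j hjP]
    rw [hPj]
  have hpq1perm : pq.dropLast.Perm ((pairs fills).take j ++ (pairs fills).drop (j+1)) := by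
    have ha : (pq.dropLast ++ [(m, (j : Int))]).Perm (pairs fills) := by
      rw [hsplit]; exact hperm
    have hb : (pairs fills).Perm
        ((m, (j : Int)) :: ((pairs fills).take j ++ (pairs fills).drop (j+1))) := by
      conv_lhs => rw [hPdecomp]
      exact List.perm_middle
    exact (((List.perm_append_singleton _ _).symm.trans ha).trans hb).cons_inv
  have hpermres : (pq.dropLast.take r ++ item :: pq.dropLast.drop r).Perm
      (pairs (fills.set j (m + d.getD key 0))) := by
    have s1 : (pq.dropLast.take r ++ item :: pq.dropLast.drop r).Perm (item :: pq.dropLast) := by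
      have h := List.perm_middle (a := item) (l₁ := pq.dropLast.take r)
        (l₂ := pq.dropLast.drop r)
      rw [List.take_append_drop] at h
      exact h
    have s2 : (item :: pq.dropLast).Perm
        (item :: ((pairs fills).take j ++ (pairs fills).drop (j+1))) := hpq1perm.cons _
    have s3 : (item :: ((pairs fills).take j ++ (pairs fills).drop (j+1))).Perm
        ((pairs fills).set j item) := by
      rw [set_eq_take_cons_drop _ _ _ hjP]
      exact List.perm_middle.symm
    rw [pairs_set fills j _ hj]
    exact (s1.trans s2).trans s3
  refine ⟨by rw [hB, hA], ?_, ?_, ?_⟩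
  · rw [hB, hA]
    simpa [hins] using hpermres
  · rw [hB]
    simp only [hins]
    exact hpdesc2
  · rw [hA]
    intro h
    have := congrArg List.length h
    simp at this
    exact hne this

-- the whole loop: B's fold projects to A's fold
theorem gp_loop_eq (d : PySem.Dict String Int) (keys : List String) :
    ∀ (buckets : List (List String)) (fills : List Int) (pq : List (Int × Int)),
      fills ≠ [] → pq.Perm (pairs fills) → pdesc pq →
      keys.foldl (gpA_step d) (buckets, fills) =
        (keys.foldl (gpB_step d) ((buckets, fills), pq)).1 := by
  induction keys with
  | nil => intro _ _ _ _ _ _; rfl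
  | cons k ks ih =>
    intro buckets fills pq hne hperm hdesc
    obtain ⟨h1, h2, h3, h4⟩ := gp_step_eq d k buckets fills pq hne hperm hdesc
    rw [List.foldl_cons, List.foldl_cons]
    have hBst : gpB_step d ((buckets, fills), pq) k =
        (((gpA_step d (buckets, fills) k).1, (gpA_step d (buckets, fills) k).2),
         (gpB_step d ((buckets, fills), pq) k).2) := by
      rw [← h1]
    rw [hBst]
    have hiha := ih (gpA_step d (buckets, fills) k).1 (gpA_step d (buckets, fills) k).2
      (gpB_step d ((buckets, fills), pq) k).2 h4 (by simpa using h2) h3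
    simpa using hiha

-- initial invariant
theorem pairs_init (n : Int) :
    pairs ((PySem.List.pyRange 0 n 1).map (fun _ => (0 : Int))) =
      (PySem.List.pyRange 0 n 1).map (fun i => ((0 : Int), i)) := by
  unfold pairs
  rw [List.map_const']
  rw [PySem.List.pyRange_one]
  simp only [List.length_replicate, List.length_map, List.length_range, List.map_map]
  apply List.map_congr_left
  intro k hk
  have hk' : k < (n - 0).toNat := List.mem_range.mp hk
  simp [List.getD_eq_getElem?_getD, List.getElem?_replicate]
  by_cases hkn : ((k : Int) < n) <;> simp [hkn]

theorem pdesc_init (n : Int) :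
    pdesc (((PySem.List.pyRange 0 n 1).reverse).map (fun i => ((0 : Int), i))) := by
  unfold pdesc
  rw [List.pairwise_map, List.pairwise_reverse]
  have h := PySem.List.pairwise_lt_pyRange_one (a := 0) (b := n)
  exact h.imp (fun {a b} hab => by unfold plex; right; exact ⟨rfl, hab⟩)


-- ===== VERDICT (by name: the statement is the Claim_ definition above) =====
theorem greedy_partition_spec : Claim_equal_greedy_partition := by
  unfold Claim_equal_greedy_partition
  intro counts n hdom hpre
  unfold Spec_greedy_partition
  rcases hpre with hc | hn
  · subst hc; rfl
  · simp only [greedy_partition, greedy_partition_alt]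
    have hne : ((PySem.List.pyRange 0 n 1).map (fun _ => (0 : Int))) ≠ [] := by
      intro h
      have := congrArg List.length h
      simp [PySem.List.length_pyRange_one] at this
      omega
    have hperm0 : (((PySem.List.pyRange 0 n 1).reverse).map (fun i => ((0 : Int), i))).Perm
        (pairs ((PySem.List.pyRange 0 n 1).map (fun _ => (0 : Int)))) := by
      rw [pairs_init, List.map_reverse]
      exact List.reverse_perm _
    exact gp_loop_eq _ _ _ _ _ hne hperm0 (pdesc_init n)
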